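-- pv_equiv track=rewrite | github.com/DeepakTSingh1998/Mini-Projects | Codility-Practice/Sorting/MaxProductofThree.py | solution
-- ===== SOURCE A (Python) =====
-- def solution (A):
--     maximum = 0
--     for i in range(2,len(A)):
--         for j in range(0,len(A)-i):
--             P = A[(i-2)]
--             Q = A[(i-2)+j+1]
--             R = A[(i-2)+j+2]
--             value = P*Q*R
--             if value > maximum:
--                 maximum = value
--
--     return maximum
-- ===== SOURCE B (Python) =====
-- def solution(A):
--     # O(n): for each middle position m, combine the consecutive product
--     # A[m]*A[m+1] with the running prefix max (if the product is >= 0)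
--     # or prefix min (if it is negative) of A[0..m-1].
--     n = len(A)
--     if n < 3:
--         return 0
--     maximum = 0
--     pmax = A[0]
--     pmin = A[0]
--     for m in range(1, n - 1):
--         c = A[m] * A[m + 1]
--         cand = pmax * c if c >= 0 else pmin * c
--         if cand > maximum:
--             maximum = cand
--         if A[m] > pmax:
--             pmax = A[m]
--         if A[m] < pmin:
--             pmin = A[m]
--     return maximum
-- ===== Notes on version B (the rewrite author's own statement) =====
-- stated objective: faster
-- what changed: Replaces A's quadratic double loop over every (first index, consecutive pair) combination by a single pass that precomputes each consecutive pair product and multiplies it with a running prefix max or prefix min chosen by the product's sign.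
import Mathlib
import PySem

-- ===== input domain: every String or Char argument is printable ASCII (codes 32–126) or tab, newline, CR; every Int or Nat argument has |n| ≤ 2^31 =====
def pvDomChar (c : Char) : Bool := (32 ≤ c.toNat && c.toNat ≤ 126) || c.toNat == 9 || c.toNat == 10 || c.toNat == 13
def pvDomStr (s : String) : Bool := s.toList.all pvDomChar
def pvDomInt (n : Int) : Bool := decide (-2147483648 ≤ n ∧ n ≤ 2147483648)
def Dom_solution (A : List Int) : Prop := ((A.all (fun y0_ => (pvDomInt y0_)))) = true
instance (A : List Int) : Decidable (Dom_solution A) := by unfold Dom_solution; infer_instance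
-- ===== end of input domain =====

-- B replaces A's quadratic scan over all (first element, consecutive pair) combinations by a
-- single pass that keeps a running prefix max/min and picks one by the sign of the pair product.

-- ===== PORT A =====
-- All list indices inside the loops are in range (0 ≤ i-2 ≤ i-2+j+2 ≤ len-1), so pyGetD is exact.
def solution (A : List Int) : Int :=
  (PySem.List.pyRange 2 (A.length : Int) 1).foldl (fun maximum i =>
    (PySem.List.pyRange 0 ((A.length : Int) - i) 1).foldl (fun maximum j =>
      let P := PySem.List.pyGetD A (i - 2) 0
      let Q := PySem.List.pyGetD A ((i - 2) + j + 1) 0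
      let R := PySem.List.pyGetD A ((i - 2) + j + 2) 0
      let value := P * Q * R
      if value > maximum then value else maximum) maximum) 0

-- ===== PORT B =====
-- state s = (maximum, pmax, pmin)
def solution_alt (A : List Int) : Int :=
  if (A.length : Int) < 3 then 0 else
    let a0 := PySem.List.pyGetD A 0 0
    ((PySem.List.pyRange 1 ((A.length : Int) - 1) 1).foldl (fun (s : Int × Int × Int) m =>
      let am := PySem.List.pyGetD A m 0
      let c := am * PySem.List.pyGetD A (m + 1) 0
      let cand := if 0 ≤ c then s.2.1 * c else s.2.2 * c
      (if cand > s.1 then cand else s.1,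
       if am > s.2.1 then am else s.2.1,
       if am < s.2.2 then am else s.2.2)) ((0 : Int), a0, a0)).1

-- ===== PRECONDITION & SPEC =====
def Spec_solution (A : List Int) (out : Int) : Prop := out = solution_alt A
instance (A : List Int) (out : Int) : Decidable (Spec_solution A out) := by unfold Spec_solution; infer_instance

-- ===== CLAIM (what is proved, stated in full; the proofs are below) =====
def Claim_equal_solution : Prop := ∀ (A : List Int), Dom_solution A → Spec_solution A (solution A)

-- ===== LEMMAS AND PROOFS =====

-- the candidate value for first index k and consecutive pair (m, m+1)
def pvVal (A : List Int) (k m : Nat) : Int := A.getD k 0 * A.getD m 0 * A.getD (m + 1) 0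

def pvUB (A : List Int) (r : Int) : Prop :=
  0 ≤ r ∧ ∀ k m : Nat, k < m → m + 1 < A.length → pvVal A k m ≤ r

def pvMem (A : List Int) (r : Int) : Prop :=
  r = 0 ∨ ∃ k m : Nat, k < m ∧ m + 1 < A.length ∧ r = pvVal A k m

theorem pv_uniq {A : List Int} {r r' : Int}
    (h1 : pvUB A r) (h2 : pvMem A r) (h3 : pvUB A r') (h4 : pvMem A r') : r = r' := by
  apply le_antisymm
  · rcases h2 with h | ⟨k, m, hk, hm, rfl⟩
    · exact h ▸ h3.1
    · exact h3.2 k m hk hm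
  · rcases h4 with h | ⟨k, m, hk, hm, rfl⟩
    · exact h ▸ h1.1
    · exact h1.2 k m hk hm

-- ---- Nat-level reformulation of port A ----
def pvInner (A : List Int) (k N : Nat) (c : Int) : Int :=
  (List.range N).foldl (fun a j => max a (pvVal A k (k + j + 1))) c

def pvAOut (A : List Int) (N : Nat) : Int :=
  (List.range N).foldl (fun acc k => pvInner A k (A.length - 2 - k) acc) 0

theorem pv_if_gt (a b : Int) : (if b > a then b else a) = max a b := by
  rcases le_or_gt b a with h | h
  · rw [if_neg (not_lt.mpr h), max_eq_left h]
  · rw [if_pos h, max_eq_right h.le]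

theorem pv_if_lt (a b : Int) : (if b < a then b else a) = min a b := by
  rcases le_or_gt a b with h | h
  · rw [if_neg (not_lt.mpr h), min_eq_left h]
  · rw [if_pos h, min_eq_right h.le]

theorem solution_eq_pvAOut (A : List Int) : solution A = pvAOut A (A.length - 2) := by
  have hn : (((A.length : Int)) - 2).toNat = A.length - 2 := by omega
  rw [solution, PySem.List.pyRange_one, hn, List.foldl_map, pvAOut]
  congr 1
  funext acc k
  have hb : (((A.length : Int) - (2 + (k : Int))) - 0).toNat = A.length - 2 - k := by omega
  rw [PySem.List.pyRange_one, hb, List.foldl_map, pvInner]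
  congr 1
  funext a j
  have h1 : (2 + (k : Int) - 2) = ((k : Nat) : Int) := by ring
  have h2 : ((k : Int)) + (0 + (j : Int)) + 1 = ((k + j + 1 : Nat) : Int) := by
    push_cast; ring
  have h3 : ((k : Int)) + (0 + (j : Int)) + 2 = ((k + j + 1 + 1 : Nat) : Int) := by
    push_cast; ring
  simp only [h1, h2, h3, PySem.List.pyGetD_natCast, pv_if_gt, pvVal]

theorem pvInner_succ (A : List Int) (k N : Nat) (c : Int) :
    pvInner A k (N + 1) c = max (pvInner A k N c) (pvVal A k (k + N + 1)) := by
  simp [pvInner, List.range_succ]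

theorem pvInner_ge (A : List Int) (k N : Nat) (c : Int) : c ≤ pvInner A k N c := by
  induction N with
  | zero => simp [pvInner]
  | succ n ih => rw [pvInner_succ]; exact le_trans ih (le_max_left _ _)

theorem pvInner_le (A : List Int) (k N : Nat) (c : Int) {j : Nat} (hj : j < N) :
    pvVal A k (k + j + 1) ≤ pvInner A k N c := by
  induction N with
  | zero => omega
  | succ n ih =>
    rw [pvInner_succ]
    rcases Nat.lt_succ_iff_lt_or_eq.mp hj with h | rfl
    · exact le_trans (ih h) (le_max_left _ _)
    · exact le_max_right _ _

theorem pvInner_cases (A : List Int) (k N : Nat) (c : Int) :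
    pvInner A k N c = c ∨ ∃ j < N, pvInner A k N c = pvVal A k (k + j + 1) := by
  induction N with
  | zero => left; simp [pvInner]
  | succ n ih =>
    rw [pvInner_succ]
    rcases le_or_gt (pvVal A k (k + n + 1)) (pvInner A k n c) with h | h
    · rw [max_eq_left h]
      rcases ih with h' | ⟨j, hj, h'⟩
      · exact Or.inl h'
      · exact Or.inr ⟨j, by omega, h'⟩
    · rw [max_eq_right h.le]
      exact Or.inr ⟨n, by omega, rfl⟩

theorem pvAOut_succ (A : List Int) (N : Nat) :
    pvAOut A (N + 1) = pvInner A N (A.length - 2 - N) (pvAOut A N) := by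
  simp [pvAOut, List.range_succ]

theorem pvAOut_nonneg (A : List Int) (N : Nat) : 0 ≤ pvAOut A N := by
  induction N with
  | zero => simp [pvAOut]
  | succ n ih => rw [pvAOut_succ]; exact le_trans ih (pvInner_ge _ _ _ _)

theorem pvAOut_le (A : List Int) (N : Nat) {k j : Nat} (hk : k < N) (hj : j < A.length - 2 - k) :
    pvVal A k (k + j + 1) ≤ pvAOut A N := by
  induction N with
  | zero => omega
  | succ n ih =>
    rw [pvAOut_succ]
    rcases Nat.lt_succ_iff_lt_or_eq.mp hk with h | rfl
    · exact le_trans (ih h) (pvInner_ge _ _ _ _)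
    · exact pvInner_le _ _ _ _ hj

theorem pvAOut_cases (A : List Int) (N : Nat) :
    pvAOut A N = 0 ∨ ∃ k < N, ∃ j < A.length - 2 - k, pvAOut A N = pvVal A k (k + j + 1) := by
  induction N with
  | zero => left; simp [pvAOut]
  | succ n ih =>
    rw [pvAOut_succ]
    rcases pvInner_cases A n (A.length - 2 - n) (pvAOut A n) with h | ⟨j, hj, h⟩
    · rw [h]
      rcases ih with h' | ⟨k, hk, j, hj, h'⟩
      · exact Or.inl h'
      · exact Or.inr ⟨k, by omega, j, hj, h'⟩
    · exact Or.inr ⟨n, by omega, j, hj, h⟩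

theorem pvA_UB (A : List Int) : pvUB A (pvAOut A (A.length - 2)) := by
  refine ⟨pvAOut_nonneg _ _, fun k m hk hm => ?_⟩
  have h : m = k + (m - k - 1) + 1 := by omega
  rw [h]
  exact pvAOut_le A _ (by omega) (by omega)

theorem pvA_Mem (A : List Int) : pvMem A (pvAOut A (A.length - 2)) := by
  rcases pvAOut_cases A (A.length - 2) with h | ⟨k, hk, j, hj, h⟩
  · exact Or.inl h
  · exact Or.inr ⟨k, k + j + 1, by omega, by omega, h⟩

-- ---- Nat-level reformulation of port B ----
def pvStep (A : List Int) (s : Int × Int × Int) (m : Nat) : Int × Int × Int :=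
  (max s.1 (if 0 ≤ A.getD m 0 * A.getD (m + 1) 0 then s.2.1 * (A.getD m 0 * A.getD (m + 1) 0)
            else s.2.2 * (A.getD m 0 * A.getD (m + 1) 0)),
   max s.2.1 (A.getD m 0), min s.2.2 (A.getD m 0))

def pvBSt (A : List Int) (N : Nat) : Int × Int × Int :=
  (List.range N).foldl (fun s t => pvStep A s (t + 1)) (0, A.getD 0 0, A.getD 0 0)

theorem solution_alt_eq_pvBSt (A : List Int) :
    solution_alt A = if A.length < 3 then 0 else (pvBSt A (A.length - 2)).1 := by
  rw [solution_alt]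
  by_cases h : A.length < 3
  · rw [if_pos (by exact_mod_cast h), if_pos h]
  · rw [if_neg (by omega), if_neg h]
    have hn : (((A.length : Int) - 1) - 1).toNat = A.length - 2 := by omega
    rw [PySem.List.pyRange_one, hn, pvBSt]
    simp only [PySem.List.pyGetD_zero]
    rw [List.foldl_map]
    congr 2
    funext s t
    have h1 : (1 + (t : Int)) = ((t + 1 : Nat) : Int) := by push_cast; ring
    have h2 : ((t + 1 : Nat) : Int) + 1 = ((t + 1 + 1 : Nat) : Int) := by push_cast; ring
    simp only [h1, h2, PySem.List.pyGetD_natCast, pv_if_gt, pv_if_lt, pvStep]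

theorem pvBSt_succ (A : List Int) (N : Nat) :
    pvBSt A (N + 1) = pvStep A (pvBSt A N) (N + 1) := by
  simp [pvBSt, List.range_succ]

theorem pvBSt_pmax_ub (A : List Int) (N : Nat) {i : Nat} (hi : i ≤ N) :
    A.getD i 0 ≤ (pvBSt A N).2.1 := by
  induction N with
  | zero => interval_cases i; simp [pvBSt]
  | succ n ih =>
    rw [pvBSt_succ]
    rcases Nat.le_succ_iff.mp hi with h | rfl
    · exact le_trans (ih h) (le_max_left _ _)
    · exact le_max_right _ _

theorem pvBSt_pmin_lb (A : List Int) (N : Nat) {i : Nat} (hi : i ≤ N) :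
    (pvBSt A N).2.2 ≤ A.getD i 0 := by
  induction N with
  | zero => interval_cases i; simp [pvBSt]
  | succ n ih =>
    rw [pvBSt_succ]
    rcases Nat.le_succ_iff.mp hi with h | rfl
    · exact le_trans (min_le_left _ _) (ih h)
    · exact min_le_right _ _

theorem pvBSt_pmax_mem (A : List Int) (N : Nat) : ∃ i ≤ N, (pvBSt A N).2.1 = A.getD i 0 := by
  induction N with
  | zero => exact ⟨0, le_refl _, by simp [pvBSt]⟩
  | succ n ih =>
    rcases ih with ⟨i, hi, h⟩
    rw [pvBSt_succ]; simp only [pvStep]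
    rcases le_or_gt (pvBSt A n).2.1 (A.getD (n + 1) 0) with hc | hc
    · exact ⟨n + 1, le_refl _, by rw [max_eq_right hc]⟩
    · exact ⟨i, by omega, by rw [max_eq_left hc.le]; exact h⟩

theorem pvBSt_pmin_mem (A : List Int) (N : Nat) : ∃ i ≤ N, (pvBSt A N).2.2 = A.getD i 0 := by
  induction N with
  | zero => exact ⟨0, le_refl _, by simp [pvBSt]⟩
  | succ n ih =>
    rcases ih with ⟨i, hi, h⟩
    rw [pvBSt_succ]; simp only [pvStep]
    rcases le_or_gt (A.getD (n + 1) 0) (pvBSt A n).2.2 with hc | hc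
    · exact ⟨n + 1, le_refl _, by rw [min_eq_right hc]⟩
    · exact ⟨i, by omega, by rw [min_eq_left hc.le]; exact h⟩

theorem pvCand_mem (A : List Int) (n : Nat) :
    ∃ k ≤ n, (if 0 ≤ A.getD (n + 1) 0 * A.getD (n + 1 + 1) 0
              then (pvBSt A n).2.1 * (A.getD (n + 1) 0 * A.getD (n + 1 + 1) 0)
              else (pvBSt A n).2.2 * (A.getD (n + 1) 0 * A.getD (n + 1 + 1) 0)) = pvVal A k (n + 1) := by
  by_cases hc : 0 ≤ A.getD (n + 1) 0 * A.getD (n + 1 + 1) 0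
  · rcases pvBSt_pmax_mem A n with ⟨i, hi, h⟩
    exact ⟨i, hi, by rw [if_pos hc, h]; simp [pvVal, mul_assoc]⟩
  · rcases pvBSt_pmin_mem A n with ⟨i, hi, h⟩
    exact ⟨i, hi, by rw [if_neg hc, h]; simp [pvVal, mul_assoc]⟩

theorem pvBSt_max_nonneg (A : List Int) (N : Nat) : 0 ≤ (pvBSt A N).1 := by
  induction N with
  | zero => simp [pvBSt]
  | succ n ih => rw [pvBSt_succ]; exact le_trans ih (le_max_left _ _)

theorem pvBSt_max_ub (A : List Int) (N : Nat) {k m : Nat} (hm : m ≤ N) (hk : k < m) :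
    pvVal A k m ≤ (pvBSt A N).1 := by
  induction N with
  | zero => omega
  | succ n ih =>
    rw [pvBSt_succ]
    rcases Nat.le_succ_iff.mp hm with h | rfl
    · exact le_trans (ih h) (le_max_left _ _)
    · -- m = n + 1; compare with the candidate chosen by sign
      have hval : pvVal A k (n + 1) = A.getD k 0 * (A.getD (n + 1) 0 * A.getD (n + 1 + 1) 0) := by
        simp [pvVal, mul_assoc]
      refine le_trans ?_ (le_max_right _ _)
      rw [hval]
      split_ifs with hc
      · exact mul_le_mul_of_nonneg_right (pvBSt_pmax_ub A n (by omega)) hc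
      · exact mul_le_mul_of_nonpos_right (pvBSt_pmin_lb A n (by omega)) (by omega)

theorem pvBSt_max_mem (A : List Int) (N : Nat) :
    (pvBSt A N).1 = 0 ∨ ∃ k m : Nat, k < m ∧ m ≤ N ∧ (pvBSt A N).1 = pvVal A k m := by
  induction N with
  | zero => left; simp [pvBSt]
  | succ n ih =>
    rw [pvBSt_succ]; simp only [pvStep]
    rcases pvCand_mem A n with ⟨k0, hk0, hkey⟩
    rw [hkey]
    rcases le_or_gt (pvVal A k0 (n + 1)) (pvBSt A n).1 with hc | hc
    · rw [max_eq_left hc]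
      rcases ih with h | ⟨k, m, hk, hm, h⟩
      · exact Or.inl h
      · exact Or.inr ⟨k, m, hk, by omega, h⟩
    · exact Or.inr ⟨k0, n + 1, by omega, le_refl _, max_eq_right hc.le⟩

theorem pvB_UB (A : List Int) :
    pvUB A (if A.length < 3 then 0 else (pvBSt A (A.length - 2)).1) := by
  split_ifs with h
  · exact ⟨le_refl _, fun k m hk hm => by omega⟩
  · exact ⟨pvBSt_max_nonneg _ _, fun k m hk hm => pvBSt_max_ub A _ (by omega) hk⟩

theorem pvB_Mem (A : List Int) :
    pvMem A (if A.length < 3 then 0 else (pvBSt A (A.length - 2)).1) := by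
  split_ifs with h
  · exact Or.inl rfl
  · rcases pvBSt_max_mem A (A.length - 2) with h' | ⟨k, m, hk, hm, h'⟩
    · exact Or.inl h'
    · exact Or.inr ⟨k, m, hk, by omega, h'⟩

-- ===== VERDICT (by name: the statement is the Claim_ definition above) =====
theorem solution_spec : Claim_equal_solution := by
  intro A _
  show solution A = solution_alt A
  rw [solution_eq_pvAOut, solution_alt_eq_pvBSt]
  exact pv_uniq (pvA_UB A) (pvA_Mem A) (pvB_UB A) (pvB_Mem A)
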